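-- pv_equiv track=rewrite | github.com/ConanSherlock/CodingExercises | python/2023/year2023_day1.py | _create_advanced_found_number
-- ===== SOURCE A (Python) =====
-- from typing import List, Dict
--
-- NUMBER_DICT = {
--     "zero": 0,
--     "one": 1,
--     "two": 2,
--     "three": 3,
--     "four": 4,
--     "five": 5,
--     "six": 6,
--     "seven": 7,
--     "eight": 8,
--     "nine": 9,
-- }
--
-- def _create_advanced_found_number(
--     found_digits: List[int],
--     found_digits_loc: List[int],
--     found_named_digits_start: Dict[str, int],
--     found_named_digits_end: Dict[str, int],
-- ) -> int:
--     if len(found_digits) == 0: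
--         first_digit_loc = -1
--         last_digit_loc = -1
--         first_digit = 0
--         last_digit = 0
--     else:
--         first_digit_loc = found_digits_loc[0]
--         last_digit_loc = found_digits_loc[-1]
--         first_digit = found_digits[0]
--         last_digit = found_digits[-1]
--
--     for found_named_digit in found_named_digits_start.keys():
--         if first_digit_loc < 0:
--             first_digit = NUMBER_DICT[found_named_digit]
--             first_digit_loc = found_named_digits_start[found_named_digit]
--         elif found_named_digits_start[found_named_digit] < first_digit_loc:
--             first_digit = NUMBER_DICT[found_named_digit]
--             first_digit_loc = found_named_digits_start[found_named_digit]
--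
--         if last_digit_loc < 0:
--             last_digit = NUMBER_DICT[found_named_digit]
--             last_digit_loc = found_named_digits_end[found_named_digit]
--         elif found_named_digits_end[found_named_digit] > last_digit_loc:
--             last_digit = NUMBER_DICT[found_named_digit]
--             last_digit_loc = found_named_digits_end[found_named_digit]
--
--     found_number = first_digit * 10 + last_digit
--
--     return found_number
-- ===== SOURCE B (Python) =====
-- NUMBER_DICT = {
--     "zero": 0,
--     "one": 1,
--     "two": 2,
--     "three": 3,
--     "four": 4,
--     "five": 5,
--     "six": 6,
--     "seven": 7,
--     "eight": 8,
--     "nine": 9,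
-- }
--
--
-- def _create_advanced_found_number(
--     found_digits,
--     found_digits_loc,
--     found_named_digits_start,
--     found_named_digits_end,
-- ):
--     # Build (location, digit) candidates, then STABLE-sort by location and read
--     # the answers off the heads: ascending for the first digit, descending for
--     # the last.  Stability makes the earlier candidate win ties, matching the
--     # strict </> preference of the reference accumulation.
--     first_cands = []
--     last_cands = []
--     if found_digits:
--         first_cands.append((found_digits_loc[0], found_digits[0]))
--         last_cands.append((found_digits_loc[-1], found_digits[-1]))
--     for name, start_loc in found_named_digits_start.items():
--         digit = NUMBER_DICT[name]
--         first_cands.append((start_loc, digit))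
--         last_cands.append((found_named_digits_end[name], digit))
--     first_sorted = sorted(first_cands, key=lambda p: p[0])
--     last_sorted = sorted(last_cands, key=lambda p: p[0], reverse=True)
--     first_digit = first_sorted[0][1] if first_sorted else 0
--     last_digit = last_sorted[0][1] if last_sorted else 0
--     return first_digit * 10 + last_digit
-- ===== Notes on version B (the rewrite author's own statement) =====
-- stated objective: alternative
-- what changed: Replaces A's single sentinel-guarded accumulation loop over four mutable variables with building two candidate (location, digit) lists, stable-sorting them by location (ascending / descending) and reading the first and last digit off the sorted heads; stability reproduces A's strict-comparison tie-breaking.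
-- outside the precondition, e.g. on _create_advanced_found_number([5], [-2], {'one': 0}, {'one': 0}): A returns 11, B returns 51
import Mathlib
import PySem

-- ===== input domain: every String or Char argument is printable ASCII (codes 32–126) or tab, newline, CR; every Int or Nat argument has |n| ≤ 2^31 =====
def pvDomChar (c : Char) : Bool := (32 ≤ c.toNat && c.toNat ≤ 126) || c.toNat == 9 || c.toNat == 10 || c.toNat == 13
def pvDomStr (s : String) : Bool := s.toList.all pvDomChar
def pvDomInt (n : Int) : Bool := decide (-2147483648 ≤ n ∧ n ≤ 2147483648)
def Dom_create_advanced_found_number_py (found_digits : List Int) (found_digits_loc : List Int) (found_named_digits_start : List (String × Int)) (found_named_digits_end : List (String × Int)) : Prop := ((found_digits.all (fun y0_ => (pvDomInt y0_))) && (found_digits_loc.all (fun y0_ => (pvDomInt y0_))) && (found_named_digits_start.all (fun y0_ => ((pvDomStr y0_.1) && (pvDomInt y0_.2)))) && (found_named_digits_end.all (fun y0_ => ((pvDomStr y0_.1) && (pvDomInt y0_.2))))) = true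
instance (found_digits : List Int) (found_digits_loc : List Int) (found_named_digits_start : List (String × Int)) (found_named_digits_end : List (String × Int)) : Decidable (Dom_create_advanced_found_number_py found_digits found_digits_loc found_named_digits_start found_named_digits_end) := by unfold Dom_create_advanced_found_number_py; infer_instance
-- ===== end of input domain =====

-- B replaces A's sentinel-guarded accumulation loop by building two candidate (location, digit)
-- lists, stable-sorting them by location (ascending / descending) and reading both digits
-- off the sorted heads (stability reproduces A's strict-comparison tie-breaking); same result by a
-- different algorithm.

-- ===== PORT A =====
def pvNUMBER_DICT : List (String × Int) :=
  [("zero", 0), ("one", 1), ("two", 2), ("three", 3), ("four", 4),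
   ("five", 5), ("six", 6), ("seven", 7), ("eight", 8), ("nine", 9)]

-- d[k] on a dict given as an association list: first match; a missing key (Python KeyError)
-- yields the stand-in 0 — Pre_ excludes exactly those inputs, so this is exact on Pre_.
def pvGetItem (d : List (String × Int)) (k : String) : Int :=
  ((d.find? (fun q => q.1 == k)).map Prod.snd).getD 0

-- the body of A's for-loop; state tuple: (first_digit_loc, last_digit_loc, first_digit, last_digit)
def pvLoopBody (s e : List (String × Int)) (st : Int × Int × Int × Int) (name : String) :
    Int × Int × Int × Int :=
  -- (first_digit, first_digit_loc) after the first if/elif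
  let p1 : Int × Int :=
    if st.1 < 0 then (pvGetItem pvNUMBER_DICT name, pvGetItem s name)
    else if pvGetItem s name < st.1 then (pvGetItem pvNUMBER_DICT name, pvGetItem s name)
    else (st.2.2.1, st.1)
  -- (last_digit, last_digit_loc) after the second if/elif
  let p2 : Int × Int :=
    if st.2.1 < 0 then (pvGetItem pvNUMBER_DICT name, pvGetItem e name)
    else if st.2.1 < pvGetItem e name then (pvGetItem pvNUMBER_DICT name, pvGetItem e name)
    else (st.2.2.2, st.2.1)
  (p1.2, p2.2, p1.1, p2.1)

def create_advanced_found_number_py (found_digits : List Int) (found_digits_loc : List Int) (found_named_digits_start : List (String × Int)) (found_named_digits_end : List (String × Int)) : Int :=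
  let init : Int × Int × Int × Int :=
    if found_digits.length = 0 then (-1, -1, 0, 0)
    else ((PySem.List.pyGet? found_digits_loc 0).getD 0,
          (PySem.List.pyGet? found_digits_loc (-1)).getD 0,
          (PySem.List.pyGet? found_digits 0).getD 0,
          (PySem.List.pyGet? found_digits (-1)).getD 0)
  -- for found_named_digit in found_named_digits_start.keys(): (keys in insertion order)
  let st := (found_named_digits_start.map Prod.fst).foldl
    (pvLoopBody found_named_digits_start found_named_digits_end) init
  st.2.2.1 * 10 + st.2.2.2

-- ===== PORT B =====
def create_advanced_found_number_py_alt (found_digits : List Int) (found_digits_loc : List Int) (found_named_digits_start : List (String × Int)) (found_named_digits_end : List (String × Int)) : Int :=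
  let base_first : List (Int × Int) :=
    if found_digits = [] then []
    else [((PySem.List.pyGet? found_digits_loc 0).getD 0, (PySem.List.pyGet? found_digits 0).getD 0)]
  let base_last : List (Int × Int) :=
    if found_digits = [] then []
    else [((PySem.List.pyGet? found_digits_loc (-1)).getD 0, (PySem.List.pyGet? found_digits (-1)).getD 0)]
  let first_cands := base_first ++
    found_named_digits_start.map (fun p => (p.2, pvGetItem pvNUMBER_DICT p.1))
  let last_cands := base_last ++
    found_named_digits_start.map (fun p => (pvGetItem found_named_digits_end p.1, pvGetItem pvNUMBER_DICT p.1))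
  -- sorted(first_cands, key=lambda p: p[0]) / sorted(last_cands, key=..., reverse=True): stable
  let first_sorted := PySem.List.sorted first_cands (fun p => p.1) false
  let last_sorted := PySem.List.sorted last_cands (fun p => p.1) true
  let first_digit := ((first_sorted.head?).map Prod.snd).getD 0
  let last_digit := ((last_sorted.head?).map Prod.snd).getD 0
  first_digit * 10 + last_digit

-- ===== PRECONDITION & SPEC =====
-- Pre_ states the function's natural domain: dict keys are unique (they come from a Python dict);
-- every start key is a spelled-out digit (else NUMBER_DICT[...] raises KeyError) and occurs in the
-- end dict (else found_named_digits_end[...] raises KeyError); a nonempty found_digits needs a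
-- nonempty found_digits_loc (else IndexError); and every location that A actually compares against
-- a later candidate must be nonnegative (locations are positions inside a puzzle line; A reuses -1
-- as an internal 'unset' sentinel that a genuinely negative compared location would be conflated
-- with): the numeric first/last locations when named digits exist, each start location except the
-- last key's, and the first key's end location when there is no numeric digit.
def Pre_create_advanced_found_number_py (found_digits : List Int) (found_digits_loc : List Int) (found_named_digits_start : List (String × Int)) (found_named_digits_end : List (String × Int)) : Prop :=
  (found_digits = [] ∨ found_digits_loc ≠ []) ∧
  (found_named_digits_start.map Prod.fst).Nodup ∧
  (∀ p ∈ found_named_digits_start,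
     p.1 ∈ ["zero", "one", "two", "three", "four", "five", "six", "seven", "eight", "nine"] ∧
     (found_named_digits_end.find? (fun q => q.1 == p.1)).isSome = true) ∧
  (found_named_digits_start ≠ [] →
     found_digits = [] ∨
       (0 ≤ (PySem.List.pyGet? found_digits_loc 0).getD 0 ∧
        0 ≤ (PySem.List.pyGet? found_digits_loc (-1)).getD 0)) ∧
  (∀ p ∈ found_named_digits_start.dropLast, 0 ≤ p.2) ∧
  (∀ p ∈ found_named_digits_start.take 1, found_digits = [] → 2 ≤ found_named_digits_start.length →
     0 ≤ ((found_named_digits_end.find? (fun q => q.1 == p.1)).map Prod.snd).getD (-1))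
instance (found_digits : List Int) (found_digits_loc : List Int) (found_named_digits_start : List (String × Int)) (found_named_digits_end : List (String × Int)) : Decidable (Pre_create_advanced_found_number_py found_digits found_digits_loc found_named_digits_start found_named_digits_end) := by unfold Pre_create_advanced_found_number_py; infer_instance

def pvWitness_create_advanced_found_number_py : List Int × List Int × (List (String × Int)) × (List (String × Int)) :=
  ([3], [1], [("one", 0)], [("one", 5)])

def Spec_create_advanced_found_number_py (found_digits : List Int) (found_digits_loc : List Int) (found_named_digits_start : List (String × Int)) (found_named_digits_end : List (String × Int)) (out : Int) : Prop := out = create_advanced_found_number_py_alt found_digits found_digits_loc found_named_digits_start found_named_digits_end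
instance (found_digits : List Int) (found_digits_loc : List Int) (found_named_digits_start : List (String × Int)) (found_named_digits_end : List (String × Int)) (out : Int) : Decidable (Spec_create_advanced_found_number_py found_digits found_digits_loc found_named_digits_start found_named_digits_end out) := by unfold Spec_create_advanced_found_number_py; infer_instance

-- ===== CLAIM (what is proved, stated in full; the proofs are below) =====
def Claim_equal_create_advanced_found_number_py : Prop := ∀ (found_digits : List Int) (found_digits_loc : List Int) (found_named_digits_start : List (String × Int)) (found_named_digits_end : List (String × Int)), Dom_create_advanced_found_number_py found_digits found_digits_loc found_named_digits_start found_named_digits_end → Pre_create_advanced_found_number_py found_digits found_digits_loc found_named_digits_start found_named_digits_end → Spec_create_advanced_found_number_py found_digits found_digits_loc found_named_digits_start found_named_digits_end (create_advanced_found_number_py found_digits found_digits_loc found_named_digits_start found_named_digits_end)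

-- ===== LEMMAS AND PROOFS =====

-- proof-side selection steps: first minimum / first maximum by location (strict comparison keeps
-- the earlier candidate — exactly the tie rule of both A's loop and a stable sort's head)
def pvMinStep (best p : Int × Int) : Int × Int := if p.1 < best.1 then p else best
def pvMaxStep (best p : Int × Int) : Int × Int := if best.1 < p.1 then p else best

-- proof-side view of A's loop body, split into the two independent (loc, dig) components
def pvStepF (s : List (String × Int)) (st : Int × Int) (name : String) : Int × Int :=
  if st.1 < 0 then (pvGetItem s name, pvGetItem pvNUMBER_DICT name)
  else if pvGetItem s name < st.1 then (pvGetItem s name, pvGetItem pvNUMBER_DICT name)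
  else st

def pvStepL (e : List (String × Int)) (st : Int × Int) (name : String) : Int × Int :=
  if st.1 < 0 then (pvGetItem e name, pvGetItem pvNUMBER_DICT name)
  else if st.1 < pvGetItem e name then (pvGetItem e name, pvGetItem pvNUMBER_DICT name)
  else st

theorem pv_fold_split (s e : List (String × Int)) (names : List String) :
    ∀ (a b c d : Int),
    names.foldl (pvLoopBody s e) (a, b, c, d) =
      ((names.foldl (pvStepF s) (a, c)).1, (names.foldl (pvStepL e) (b, d)).1,
       (names.foldl (pvStepF s) (a, c)).2, (names.foldl (pvStepL e) (b, d)).2) := by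
  induction names with
  | nil => intro a b c d; rfl
  | cons n t ih =>
    intro a b c d
    simp only [List.foldl_cons]
    have hstep : pvLoopBody s e (a, b, c, d) n =
        ((pvStepF s (a, c) n).1, (pvStepL e (b, d) n).1,
         (pvStepF s (a, c) n).2, (pvStepL e (b, d) n).2) := by
      simp only [pvLoopBody, pvStepF, pvStepL]
      split_ifs <;> rfl
    rw [hstep, ih]

theorem pv_lookup_self (s : List (String × Int)) (hnd : (s.map Prod.fst).Nodup) :
    ∀ q ∈ s, pvGetItem s q.1 = q.2 := by
  induction s with
  | nil => intro q hq; cases hq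
  | cons a t ih =>
    intro q hq
    simp only [List.map_cons, List.nodup_cons] at hnd
    rcases List.mem_cons.mp hq with rfl | hq
    · simp [pvGetItem]
    · have hne : (a.1 == q.1) = false := by
        have : q.1 ∈ t.map Prod.fst := List.mem_map_of_mem hq
        simp only [beq_eq_false_iff_ne, ne_eq]
        intro h; exact hnd.1 (h ▸ this)
      simpa [pvGetItem, List.find?, hne] using ih hnd.2 q hq

theorem pv_end_nonneg (e : List (String × Int)) (k : String)
    (h : 0 ≤ ((e.find? (fun q => q.1 == k)).map Prod.snd).getD (-1)) :
    0 ≤ pvGetItem e k := by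
  unfold pvGetItem
  cases hfind : e.find? (fun q => q.1 == k) with
  | none => rw [hfind] at h; simp at h
  | some q => rw [hfind] at h; simpa using h

theorem pv_foldF_min (s : List (String × Int)) :
    ∀ (names : List String) (st : Int × Int), (names ≠ [] → 0 ≤ st.1) →
      (∀ n ∈ names.dropLast, 0 ≤ pvGetItem s n) →
      names.foldl (pvStepF s) st =
        (names.map (fun n => (pvGetItem s n, pvGetItem pvNUMBER_DICT n))).foldl pvMinStep st := by
  intro names
  induction names with
  | nil => intro st _ _; rfl
  | cons n t ih =>
    intro st h1 hall
    have hst : 0 ≤ st.1 := h1 (by simp)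
    simp only [List.foldl_cons, List.map_cons]
    have hstep : pvStepF s st n = pvMinStep st (pvGetItem s n, pvGetItem pvNUMBER_DICT n) := by
      simp only [pvStepF, pvMinStep, if_neg (by omega : ¬ st.1 < 0)]
    rw [hstep]
    refine ih _ ?_ ?_
    · intro ht
      have hdrop : (n :: t).dropLast = n :: t.dropLast := List.dropLast_cons_of_ne_nil ht
      have hn : 0 ≤ pvGetItem s n := hall n (by rw [hdrop]; exact List.mem_cons_self ..)
      simp only [pvMinStep]
      split_ifs
      · exact hn
      · exact hst
    · intro m hm
      have ht : t ≠ [] := by rintro rfl; simp at hm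
      exact hall m (by rw [List.dropLast_cons_of_ne_nil ht]; exact List.mem_cons_of_mem _ hm)

theorem pv_foldL_max (e : List (String × Int)) :
    ∀ (names : List String) (st : Int × Int), (names ≠ [] → 0 ≤ st.1) →
      names.foldl (pvStepL e) st =
        (names.map (fun n => (pvGetItem e n, pvGetItem pvNUMBER_DICT n))).foldl pvMaxStep st := by
  intro names
  induction names with
  | nil => intro st _; rfl
  | cons n t ih =>
    intro st h1
    have hst : 0 ≤ st.1 := h1 (by simp)
    simp only [List.foldl_cons, List.map_cons]
    have hstep : pvStepL e st n = pvMaxStep st (pvGetItem e n, pvGetItem pvNUMBER_DICT n) := by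
      simp only [pvStepL, pvMaxStep, if_neg (by omega : ¬ st.1 < 0)]
    rw [hstep]
    refine ih _ (fun _ => ?_)
    simp only [pvMaxStep]
    split_ifs with h
    · omega
    · exact hst

-- the head of a stable insertion step: x lands in front iff it is strictly before the old head
theorem pv_head?_insertBy {α : Type} (before : α → α → Bool) (x y : α) (ys : List α) :
    (PySem.List.insertBy before x (y :: ys)).head? =
      some (if before x y then x else y) := by
  simp only [PySem.List.insertBy]
  split_ifs <;> rfl

-- the head of the insertion-sort fold is the running 'first extremal' accumulator
theorem pv_head?_foldl_insertBy {α : Type} (before : α → α → Bool) :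
    ∀ (cs : List α) (c : α) (t : List α),
      ((cs.foldl (fun acc x => PySem.List.insertBy before x acc) (c :: t)).head?) =
        some (cs.foldl (fun m x => if before x m then x else m) c) := by
  intro cs
  induction cs with
  | nil => intro c t; rfl
  | cons x rest ih =>
    intro c t
    simp only [List.foldl_cons]
    have hne : PySem.List.insertBy before x (c :: t) ≠ [] := by
      simp only [PySem.List.insertBy]
      split_ifs <;> simp
    obtain ⟨c', t', hct⟩ := List.exists_cons_of_ne_nil hne
    have hc' : c' = if before x c then x else c := by
      have := pv_head?_insertBy before x c t
      rw [hct] at this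
      simpa using this
    rw [hct, ih, hc']

-- head of the stable ascending sort = first minimum by location
theorem pv_sorted_head_min (c : Int × Int) (cs : List (Int × Int)) :
    (PySem.List.sorted (c :: cs) (fun p => p.1) false).head? =
      some (cs.foldl pvMinStep c) := by
  rw [PySem.List.sorted_eq_foldl_insertBy]
  simp only [List.foldl_cons]
  have h0 : PySem.List.insertBy (fun a b : Int × Int => decide (a.1 < b.1)) c [] = [c] := rfl
  rw [h0, pv_head?_foldl_insertBy]
  simp only [decide_eq_true_eq]
  have hf : (fun (m x : Int × Int) => if x.1 < m.1 then x else m) = pvMinStep := by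
    funext m x; simp [pvMinStep]
  rw [hf]

-- head of the stable descending sort = first maximum by location
theorem pv_sorted_head_max (c : Int × Int) (cs : List (Int × Int)) :
    (PySem.List.sorted (c :: cs) (fun p => p.1) true).head? =
      some (cs.foldl pvMaxStep c) := by
  rw [PySem.List.sorted_rev_eq_foldl_insertBy]
  simp only [List.foldl_cons]
  have h0 : PySem.List.insertBy (fun a b : Int × Int => decide (b.1 < a.1)) c [] = [c] := rfl
  rw [h0, pv_head?_foldl_insertBy]
  simp only [decide_eq_true_eq]
  have hf : (fun (m x : Int × Int) => if m.1 < x.1 then x else m) = pvMaxStep := by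
    funext m x; simp [pvMaxStep]
  rw [hf]

-- ===== VERDICT (by name: the statement is the Claim_ definition above) =====
theorem create_advanced_found_number_py_spec : Claim_equal_create_advanced_found_number_py := by
  intro fd fl s e _hdom hpre
  obtain ⟨h1, hnd, hkeys, hfl, hsv, hhead⟩ := hpre
  unfold Spec_create_advanced_found_number_py
  have hlook : ∀ q ∈ s, pvGetItem s q.1 = q.2 := pv_lookup_self s hnd
  have hsv' : ∀ n ∈ (s.map Prod.fst).dropLast, 0 ≤ pvGetItem s n := by
    intro n hn
    rw [← List.map_dropLast] at hn
    obtain ⟨q, hq, rfl⟩ := List.mem_map.mp hn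
    rw [hlook q (List.dropLast_subset _ hq)]
    exact hsv q hq
  have hcandF : (s.map Prod.fst).map (fun n => (pvGetItem s n, pvGetItem pvNUMBER_DICT n)) =
      s.map (fun p => (p.2, pvGetItem pvNUMBER_DICT p.1)) := by
    rw [List.map_map]
    exact List.map_congr_left (fun q hq => by simp [Function.comp, hlook q hq])
  have hcandL : (s.map Prod.fst).map (fun n => (pvGetItem e n, pvGetItem pvNUMBER_DICT n)) =
      s.map (fun p => (pvGetItem e p.1, pvGetItem pvNUMBER_DICT p.1)) := by
    rw [List.map_map]; rfl
  by_cases hfd : fd = []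
  · -- no numeric digits: the sentinel branch takes the first named digit unconditionally
    subst hfd
    unfold create_advanced_found_number_py create_advanced_found_number_py_alt
    simp only [List.length_nil, List.nil_append, if_true]
    rw [pv_fold_split]
    cases s with
    | nil => rfl
    | cons q rest =>
      have hq0 : pvGetItem (q :: rest) q.1 = q.2 := hlook q (by simp)
      have hrest : ∀ n ∈ (rest.map Prod.fst).dropLast, 0 ≤ pvGetItem (q :: rest) n := by
        intro n hn
        have ht : rest ≠ [] := by rintro rfl; simp at hn
        refine hsv' n ?_
        rw [List.map_cons, List.dropLast_cons_of_ne_nil (by simpa using ht)]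
        exact List.mem_cons_of_mem _ hn
      have hF : (q.1 :: rest.map Prod.fst).foldl (pvStepF (q :: rest)) (-1, 0) =
          (rest.map (fun p => (p.2, pvGetItem pvNUMBER_DICT p.1))).foldl pvMinStep
            (q.2, pvGetItem pvNUMBER_DICT q.1) := by
        simp only [List.foldl_cons]
        have hs0 : pvStepF (q :: rest) (-1, 0) q.1 = (q.2, pvGetItem pvNUMBER_DICT q.1) := by
          simp [pvStepF, hq0]
        rw [hs0, pv_foldF_min (q :: rest) (rest.map Prod.fst) _ ?hseed hrest]
        · have : (rest.map Prod.fst).map (fun n => (pvGetItem (q :: rest) n, pvGetItem pvNUMBER_DICT n)) =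
              rest.map (fun p => (p.2, pvGetItem pvNUMBER_DICT p.1))  := by
            rw [List.map_map]
            refine List.map_congr_left (fun p hp => ?_)
            simp [Function.comp, hlook p (by simp [hp])]
          rw [this]
        case hseed =>
          intro hne
          have ht : rest ≠ [] := by simpa using hne
          refine hsv q ?_
          rw [List.dropLast_cons_of_ne_nil ht]
          exact List.mem_cons_self ..
      have hL : (q.1 :: rest.map Prod.fst).foldl (pvStepL e) (-1, 0) =
          (rest.map (fun p => (pvGetItem e p.1, pvGetItem pvNUMBER_DICT p.1))).foldl pvMaxStep
            (pvGetItem e q.1, pvGetItem pvNUMBER_DICT q.1) := by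
        simp only [List.foldl_cons]
        have hs0 : pvStepL e (-1, 0) q.1 = (pvGetItem e q.1, pvGetItem pvNUMBER_DICT q.1) := by
          simp [pvStepL]
        rw [hs0, pv_foldL_max e (rest.map Prod.fst) _ ?hseed]
        · have : (rest.map Prod.fst).map (fun n => (pvGetItem e n, pvGetItem pvNUMBER_DICT n)) =
              rest.map (fun p => (pvGetItem e p.1, pvGetItem pvNUMBER_DICT p.1)) := by
            rw [List.map_map]; rfl
          rw [this]
        case hseed =>
          intro hne
          have ht : rest ≠ [] := by simpa using hne
          refine pv_end_nonneg e q.1 (hhead q (by simp) rfl ?_)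
          have := List.length_pos_of_ne_nil ht
          simp only [List.length_cons]
          omega
      simp only [List.map_cons]
      rw [hF, hL, pv_sorted_head_min, pv_sorted_head_max]
      rfl
  · -- numeric digits present: they seed both selections
    have hlen : ¬ fd.length = 0 := by simpa [List.length_eq_zero_iff] using hfd
    have hflpos : ∀ hne : s ≠ [],
        0 ≤ (PySem.List.pyGet? fl 0).getD 0 ∧ 0 ≤ (PySem.List.pyGet? fl (-1)).getD 0 :=
      fun hne => (hfl hne).resolve_left hfd
    unfold create_advanced_found_number_py create_advanced_found_number_py_alt
    simp only [if_neg hlen, if_neg hfd]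
    rw [pv_fold_split]
    rw [pv_foldF_min s (s.map Prod.fst) _
          (fun hne => (hflpos (by simpa using hne)).1) hsv',
        pv_foldL_max e (s.map Prod.fst) _
          (fun hne => (hflpos (by simpa using hne)).2),
        hcandF, hcandL]
    simp only [List.singleton_append]
    rw [pv_sorted_head_min, pv_sorted_head_max]
    rfl
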